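-- pv_equiv track=rewrite | github.com/soosbk/Algorithm | 구현/이모티콘 할인행사.py | solution
-- ===== SOURCE A (Python) =====
-- from itertools import product
--
-- def ca(users,user_info):
--     membership=0
--     fee=0
--     for i in range(len(users)):
--         if user_info[i]>=users[i][1]:
--             membership+=1
--         else:
--             fee+=user_info[i]
--     return membership,fee
--
-- def solution(users, emoticons):
--     discount=[40,30,20,10] #0.6,0.7,0.8,0.9
--     plus=0
--     fee=0
--     fees=[]
--     for emoticon in emoticons:
--         fees.append([int(emoticon*(100-discount[i])/100) for i in range(4)])
--
--     for ds in product([0,1,2,3],repeat=len(emoticons)):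
--         user_info=[0]*len(users) #구매가격
--         for i in range(len(ds)):
--             for j in range(len(users)):
--                 u_ds=users[j][0]
--                 if discount[ds[i]]>=u_ds:
--                     user_info[j]+=fees[i][ds[i]]
--
--
--
--         m,f=ca(users,user_info)
--
--         if plus<m:
--             plus=m
--             fee=f
--         elif plus==m:
--             fee=max(fee,f)
--
--
--     return [plus,fee]
-- ===== SOURCE B (Python) =====
-- def solution(users, emoticons):
--     discount = [40, 30, 20, 10]
--     n = len(emoticons)
--     spend = [0] * len(users)
--     best = [0, 0]
--
--     def dfs(i):
--         if i == n:
--             m = 0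
--             f = 0
--             for (rate, limit), s in zip(users, spend):
--                 if s >= limit:
--                     m += 1
--                 else:
--                     f += s
--             if best[0] < m:
--                 best[0], best[1] = m, f
--             elif best[0] == m:
--                 best[1] = max(best[1], f)
--             return
--         e = emoticons[i]
--         for d in discount:
--             price = int(e * (100 - d) / 100)
--             for j, (rate, _) in enumerate(users):
--                 if d >= rate:
--                     spend[j] += price
--             dfs(i + 1)
--             for j, (rate, _) in enumerate(users):
--                 if d >= rate:
--                     spend[j] -= price
--
--     dfs(0)
--     return best
-- ===== Notes on version B (the rewrite author's own statement) =====
-- stated objective: alternative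
-- what changed: Replaces the flat itertools.product enumeration (which rebuilds the whole user spend array and the fees table for every tuple) with recursive DFS/backtracking over emoticon indices that incrementally updates and restores one shared spend array, sharing the spend computation across tuples with a common prefix.
import Mathlib
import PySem

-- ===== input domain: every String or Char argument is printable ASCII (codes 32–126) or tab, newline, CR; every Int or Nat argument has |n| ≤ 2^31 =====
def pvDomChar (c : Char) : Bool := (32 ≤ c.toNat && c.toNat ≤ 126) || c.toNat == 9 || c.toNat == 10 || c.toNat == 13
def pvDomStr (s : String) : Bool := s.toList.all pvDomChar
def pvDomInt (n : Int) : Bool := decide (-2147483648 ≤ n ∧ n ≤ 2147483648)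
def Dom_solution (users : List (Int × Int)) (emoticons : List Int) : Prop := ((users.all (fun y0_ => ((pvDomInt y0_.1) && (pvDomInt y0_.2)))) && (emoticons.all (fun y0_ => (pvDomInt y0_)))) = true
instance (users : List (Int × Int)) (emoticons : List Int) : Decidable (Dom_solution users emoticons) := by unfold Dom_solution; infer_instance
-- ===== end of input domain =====

-- B replaces A's flat itertools.product enumeration (fresh spend array per tuple) by DFS/backtracking
-- that extends one spend array incrementally, sharing work across tuples with a common prefix.

-- ===== PORT A =====
-- itertools.product([0,1,2,3], repeat=n), in Python's order (leftmost position varies slowest)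
def pyProduct4 : Nat → List (List Nat)
  | 0 => [[]]
  | n + 1 => ([0, 1, 2, 3] : List Nat).flatMap (fun d => (pyProduct4 n).map (fun t => d :: t))

def ca (users : List (Int × Int)) (user_info : List Int) : Int × Int :=
  (List.range users.length).foldl (fun mf i =>
    if user_info.getD i 0 ≥ (users.getD i ((0 : Int), (0 : Int))).2 then (mf.1 + 1, mf.2)
    else (mf.1, mf.2 + user_info.getD i 0)) (0, 0)

-- int(emoticon*(100-discount[i])/100) is ported as truncated integer division Int.tdiv:
-- on Dom (|emoticon| ≤ 2^31) the float product is exact and the quotient's fractional part,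
-- a nonzero multiple of 1/100 when nonzero, exceeds the rounding error, so int() of the float
-- equals truncation of the exact quotient.
def solution (users : List (Int × Int)) (emoticons : List Int) : List Int :=
  let discount : List Int := [40, 30, 20, 10]
  let fees : List (List Int) :=
    emoticons.foldl (fun acc e =>
      acc ++ [(List.range 4).map (fun i => Int.tdiv (e * (100 - discount.getD i 0)) 100)]) []
  let pf : Int × Int :=
    (pyProduct4 emoticons.length).foldl (fun pf ds =>
      let user_info : List Int :=
        (List.range ds.length).foldl (fun ui i =>
          (List.range users.length).foldl (fun ui j =>
            if discount.getD (ds.getD i 0) 0 ≥ (users.getD j ((0 : Int), (0 : Int))).1 then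
              ui.set j (ui.getD j 0 + (fees.getD i []).getD (ds.getD i 0) 0)
            else ui) ui) (List.replicate users.length 0)
      let mf := ca users user_info
      if pf.1 < mf.1 then mf
      else if pf.1 = mf.1 then (pf.1, max pf.2 mf.2)
      else pf) (0, 0)
  [pf.1, pf.2]

-- ===== PORT B =====
def calcB (users : List (Int × Int)) (spend : List Int) : Int × Int :=
  (users.zip spend).foldl (fun mf p =>
    if p.2 ≥ p.1.2 then (mf.1 + 1, mf.2) else (mf.1, mf.2 + p.2)) (0, 0)

def bestUpd (best mf : Int × Int) : Int × Int :=
  if best.1 < mf.1 then mf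
  else if best.1 = mf.1 then (best.1, max best.2 mf.2)
  else best

-- Source B's dfs; the mutate-then-restore of `spend` is ported functionally: the recursive call
-- receives the updated spend list, the caller keeps the old one (same values at every node).
def dfsB (users : List (Int × Int)) : List Int → List Int → Int × Int → Int × Int
  | [], spend, best => bestUpd best (calcB users spend)
  | e :: rest, spend, best =>
      ([40, 30, 20, 10] : List Int).foldl (fun b d =>
        let price := Int.tdiv (e * (100 - d)) 100
        dfsB users rest
          ((users.zip spend).map (fun p => if d ≥ p.1.1 then p.2 + price else p.2)) b) best

def solution_alt (users : List (Int × Int)) (emoticons : List Int) : List Int :=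
  let best := dfsB users emoticons (List.replicate users.length 0) (0, 0)
  [best.1, best.2]

-- ===== PRECONDITION & SPEC =====
def Spec_solution (users : List (Int × Int)) (emoticons : List Int) (out : List Int) : Prop := out = solution_alt users emoticons
instance (users : List (Int × Int)) (emoticons : List Int) (out : List Int) : Decidable (Spec_solution users emoticons out) := by unfold Spec_solution; infer_instance

-- ===== CLAIM (what is proved, stated in full; the proofs are below) =====
def Claim_equal_solution : Prop := ∀ (users : List (Int × Int)) (emoticons : List Int), Dom_solution users emoticons → Spec_solution users emoticons (solution users emoticons)

-- ===== LEMMAS AND PROOFS =====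

-- one DFS step: add the discounted price of emoticon e at discount index k to each qualifying user
def stepS (users : List (Int × Int)) (e : Int) (k : Nat) (ui : List Int) : List Int :=
  (users.zip ui).map (fun p =>
    if ([40, 30, 20, 10] : List Int).getD k 0 ≥ p.1.1 then
      p.2 + Int.tdiv (e * (100 - ([40, 30, 20, 10] : List Int).getD k 0)) 100
    else p.2)

-- total spend after choosing discount indices ks for emoticons ems, starting from ui
def addAll (users : List (Int × Int)) : List Int → List Nat → List Int → List Int
  | [], _, ui => ui
  | _ :: _, [], ui => ui
  | e :: ems, k :: ks, ui => addAll users ems ks (stepS users e k ui)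

lemma stepS_length (users : List (Int × Int)) (e : Int) (k : Nat) (ui : List Int)
    (h : ui.length = users.length) : (stepS users e k ui).length = users.length := by
  simp [stepS, h]

lemma addAll_length (users : List (Int × Int)) :
    ∀ (ems : List Int) (ks : List Nat) (ui : List Int), ui.length = users.length →
      (addAll users ems ks ui).length = users.length := by
  intro ems
  induction ems with
  | nil => intro ks ui h; simpa [addAll] using h
  | cons e ems ih =>
    intro ks ui h
    match ks with
    | [] => simpa [addAll] using h
    | k :: ks => exact ih ks _ (stepS_length users e k ui h)

lemma pyProduct4_mem : ∀ (n : Nat) (ds : List Nat), ds ∈ pyProduct4 n →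
    ds.length = n ∧ ∀ k ∈ ds, k < 4 := by
  intro n
  induction n with
  | zero =>
    intro ds h
    simp [pyProduct4] at h
    subst h; simp
  | succ n ih =>
    intro ds h
    simp only [pyProduct4, List.mem_flatMap, List.mem_map] at h
    obtain ⟨k, hk, t, ht, rfl⟩ := h
    obtain ⟨hlen, hall⟩ := ih t ht
    refine ⟨by simp [hlen], ?_⟩
    intro k' hk'
    rcases List.mem_cons.mp hk' with h' | h'
    · subst h'; simp at hk; omega
    · exact hall k' h'

-- a fold whose step keeps the head of a cons state and acts on the tail as g does
lemma consFold (f g : List Int → Nat → List Int) (x : Int)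
    (h : ∀ s j, f (x :: s) j = x :: g s j) :
    ∀ (l : List Nat) (xs : List Int),
      l.foldl f (x :: xs) = x :: l.foldl g xs := by
  intro l
  induction l with
  | nil => intro xs; rfl
  | cons j l ihl =>
    intro xs
    simp only [List.foldl_cons, h]
    exact ihl _

-- A's inner j-loop (index-wise set) equals the map over users.zip ui that B performs
lemma innerFold (d v : Int) :
    ∀ (users : List (Int × Int)) (ui : List Int), ui.length = users.length →
      (List.range users.length).foldl (fun ui j =>
          if d ≥ (users.getD j ((0 : Int), (0 : Int))).1 then ui.set j (ui.getD j 0 + v) else ui) ui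
        = (users.zip ui).map (fun p => if d ≥ p.1.1 then p.2 + v else p.2) := by
  intro users
  induction users with
  | nil =>
    intro ui h
    have hui : ui = [] := List.length_eq_zero_iff.mp (by simpa using h)
    subst hui; rfl
  | cons u us ih =>
    intro ui h
    match ui with
    | [] => simp at h
    | w :: ws =>
      have hlen : ws.length = us.length := by simpa using h
      rw [List.length_cons, List.range_succ_eq_map, List.foldl_cons, List.foldl_map]
      have h0 : (if d ≥ ((u :: us).getD 0 ((0 : Int), (0 : Int))).1 then
            (w :: ws).set 0 ((w :: ws).getD 0 0 + v) else w :: ws)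
          = (if d ≥ u.1 then w + v else w) :: ws := by
        by_cases hc : d ≥ u.1 <;> simp [hc]
      rw [h0, List.zip_cons_cons, List.map_cons]
      simp only [Nat.succ_eq_add_one]
      rw [consFold
            (fun (s : List Int) (j : Nat) =>
              if d ≥ ((u :: us).getD (j + 1) ((0 : Int), (0 : Int))).1 then
                s.set (j + 1) (s.getD (j + 1) 0 + v) else s)
            (fun (s : List Int) (j : Nat) =>
              if d ≥ (us.getD j ((0 : Int), (0 : Int))).1 then
                s.set j (s.getD j 0 + v) else s)
            (if d ≥ u.1 then w + v else w)
            (by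
              intro s j
              simp only [List.getD_cons_succ, List.set_cons_succ]
              split <;> rfl)
            (List.range us.length) ws]
      rw [ih ws hlen]

-- A's ca (index loop) equals B's zip fold, for any initial accumulator
lemma caFold :
    ∀ (users : List (Int × Int)) (ui : List Int) (mf : Int × Int), ui.length = users.length →
      (List.range users.length).foldl (fun mf i =>
          if ui.getD i 0 ≥ (users.getD i ((0 : Int), (0 : Int))).2 then (mf.1 + 1, mf.2)
          else (mf.1, mf.2 + ui.getD i 0)) mf
        = (users.zip ui).foldl (fun mf p =>
            if p.2 ≥ p.1.2 then (mf.1 + 1, mf.2) else (mf.1, mf.2 + p.2)) mf := by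
  intro users
  induction users with
  | nil =>
    intro ui mf h
    have hui : ui = [] := List.length_eq_zero_iff.mp (by simpa using h)
    subst hui; rfl
  | cons u us ih =>
    intro ui mf h
    match ui with
    | [] => simp at h
    | w :: ws =>
      have hlen : ws.length = us.length := by simpa using h
      rw [List.length_cons, List.range_succ_eq_map, List.foldl_cons, List.foldl_map]
      simp only [Nat.succ_eq_add_one, List.getD_cons_succ, List.getD_cons_zero]
      rw [ih ws _ hlen, List.zip_cons_cons, List.foldl_cons]

-- A's outer i-loop over a discount-index tuple ds equals the sequential addAll
lemma outerFold (users : List (Int × Int)) (F : Int → List Int)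
    (hF : ∀ e k, k < 4 →
      (F e).getD k 0 = Int.tdiv (e * (100 - ([40, 30, 20, 10] : List Int).getD k 0)) 100) :
    ∀ (ems : List Int) (ds : List Nat) (ui : List Int),
      ds.length = ems.length → ui.length = users.length → (∀ k ∈ ds, k < 4) →
      (List.range ds.length).foldl (fun ui i =>
        (List.range users.length).foldl (fun ui j =>
          if ([40, 30, 20, 10] : List Int).getD (ds.getD i 0) 0 ≥
              (users.getD j ((0 : Int), (0 : Int))).1 then
            ui.set j (ui.getD j 0 + ((ems.map F).getD i []).getD (ds.getD i 0) 0)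
          else ui) ui) ui
      = addAll users ems ds ui := by
  intro ems
  induction ems with
  | nil =>
    intro ds ui hlen hui _
    have hds : ds = [] := List.length_eq_zero_iff.mp (by simpa using hlen)
    subst hds; rfl
  | cons e ems ih =>
    intro ds ui hlen hui hk
    match ds with
    | [] => simp at hlen
    | k :: ks =>
      have hks : ks.length = ems.length := by simpa using hlen
      have hk4 : k < 4 := hk k (by simp)
      rw [show (k :: ks).length = ks.length + 1 from rfl, List.range_succ_eq_map,
        List.foldl_cons, List.foldl_map]
      simp only [Nat.succ_eq_add_one, List.getD_cons_succ, List.getD_cons_zero, List.map_cons]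
      rw [hF e k hk4]
      rw [innerFold _ _ users ui hui]
      rw [show (users.zip ui).map (fun p =>
            if ([40, 30, 20, 10] : List Int).getD k 0 ≥ p.1.1 then
              p.2 + Int.tdiv (e * (100 - ([40, 30, 20, 10] : List Int).getD k 0)) 100
            else p.2) = stepS users e k ui from rfl]
      rw [show addAll users (e :: ems) (k :: ks) ui
            = addAll users ems ks (stepS users e k ui) from rfl]
      exact ih ks (stepS users e k ui) hks (stepS_length users e k ui hui)
        (fun k' hk' => hk k' (List.mem_cons_of_mem _ hk'))

-- B's DFS is the fold of the update rule over all discount-index tuples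
lemma dfs_eq (users : List (Int × Int)) :
    ∀ (ems : List Int) (spend : List Int) (best : Int × Int),
      dfsB users ems spend best
        = (pyProduct4 ems.length).foldl
            (fun b ks => bestUpd b (calcB users (addAll users ems ks spend))) best := by
  intro ems
  induction ems with
  | nil => intro spend best; simp [dfsB, pyProduct4, addAll]
  | cons e ems ih =>
    intro spend best
    rw [show dfsB users (e :: ems) spend best
        = ([40, 30, 20, 10] : List Int).foldl (fun b d =>
            dfsB users ems
              ((users.zip spend).map (fun p =>
                if d ≥ p.1.1 then p.2 + Int.tdiv (e * (100 - d)) 100 else p.2)) b) best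
      from rfl]
    rw [show ([40, 30, 20, 10] : List Int)
        = ([0, 1, 2, 3] : List Nat).map (fun k => ([40, 30, 20, 10] : List Int).getD k 0)
      from rfl]
    rw [show (e :: ems).length = ems.length + 1 from rfl]
    rw [show pyProduct4 (ems.length + 1)
        = ([0, 1, 2, 3] : List Nat).flatMap (fun d => (pyProduct4 ems.length).map (fun t => d :: t))
      from rfl]
    rw [List.foldl_flatMap]
    simp only [List.foldl_map]
    refine PySem.List.foldl_congr_mem _ _ _ _ ?_
    intro b k _
    rw [ih _ b]
    refine PySem.List.foldl_congr_mem _ _ _ _ ?_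
    intro b' ks _
    rw [show addAll users (e :: ems) (k :: ks) spend
        = addAll users ems ks (stepS users e k spend) from rfl]
    rfl

-- ===== VERDICT (by name: the statement is the Claim_ definition above) =====
theorem solution_spec : Claim_equal_solution := by
  unfold Claim_equal_solution
  intro users emoticons _
  unfold Spec_solution
  show solution users emoticons = solution_alt users emoticons
  simp only [solution, solution_alt, PySem.List.foldl_append_singleton_eq_map, List.nil_append]
  rw [dfs_eq]
  apply congrArg (f := fun p : Int × Int => [p.1, p.2])
  refine PySem.List.foldl_congr_mem _ _ _ _ ?_
  intro pf ds hds
  obtain ⟨hlen, hk⟩ := pyProduct4_mem _ ds hds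
  have hFF : ∀ (e : Int) (k : Nat), k < 4 →
      ((fun e => (List.range 4).map (fun i =>
          Int.tdiv (e * (100 - ([40, 30, 20, 10] : List Int).getD i 0)) 100)) e).getD k 0
        = Int.tdiv (e * (100 - ([40, 30, 20, 10] : List Int).getD k 0)) 100 := by
    intro e k hk4
    exact PySem.List.getD_map_range _ 4 k 0 hk4
  rw [outerFold users
      (fun e => (List.range 4).map (fun i =>
        Int.tdiv (e * (100 - ([40, 30, 20, 10] : List Int).getD i 0)) 100))
      hFF emoticons ds (List.replicate users.length 0) hlen (by simp) hk]
  simp only [ca]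
  rw [caFold users _ (0, 0)
      (addAll_length users emoticons ds (List.replicate users.length 0) (by simp))]
  simp only [bestUpd, calcB]
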